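-- pv_equiv track=rewrite | github.com/christianebacani/Roadmap | Coding Challenges using Python and SQL/Code Wars Python Solved Problems/7 Kyu/holiday_ii_plane_seating.py | plane_seat
-- ===== SOURCE A (Python) =====
-- def plane_seat(user_plane_section_sector: str) -> str:
--     plane_sections = {
--         'Front': [
--             1, 2, 3, 4, 5, 6, 7, 8, 9, 10, 11, 12, 13, 14, 15, 16, 17, 18, 19, 20
--         ],
--         'Middle': [
--             21, 22, 23, 24, 25, 26, 27, 28, 29, 30, 31, 32, 33, 34, 35, 36, 37, 38, 39, 40
--         ],
--         'Back': [
--             41, 42, 43, 44, 45, 46, 47, 48, 49, 50, 51, 52, 53, 54, 55, 56, 57, 58, 59, 60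
--         ]
--     }
--     plane_sectors = {
--         'Left': 'ABC',
--         'Middle': 'DEF',
--         'Right': 'GHK'
--     }
--
--     user_plane_section, user_plane_sector = '', ''
--
--     for i in range(len(user_plane_section_sector)):
--         if user_plane_section_sector[i].isdigit():
--             user_plane_section += user_plane_section_sector[i]
--
--         else:
--             user_plane_sector += user_plane_section_sector[i]
--
--     if int(user_plane_section) < 1 or int(user_plane_section) > 60:
--         return 'No Seat!!'
--
--     result = []
--
--     for position, plane_section in plane_sections.items():
--         if int(user_plane_section) in plane_section:
--             result.append(position)
--
--     for position, plane_sector in plane_sectors.items():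
--         if user_plane_sector in plane_sector:
--             result.append(position)
--
--     if len(result) != 2:
--         return 'No Seat!!'
--
--     return '-'.join(result)
-- ===== SOURCE B (Python) =====
-- def plane_seat(user_plane_section_sector: str) -> str:
--     digits = ''.join(c for c in user_plane_section_sector if c.isdigit())
--     letters = ''.join(c for c in user_plane_section_sector if not c.isdigit())
--     n = int(digits)
--     if not (1 <= n <= 60):
--         return 'No Seat!!'
--     section = ('Front', 'Middle', 'Back')[(n - 1) // 20]
--     matches = [name for name, group in (('Left', 'ABC'), ('Middle', 'DEF'), ('Right', 'GHK'))
--                if letters in group]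
--     if len(matches) != 1:
--         return 'No Seat!!'
--     return section + '-' + matches[0]
-- ===== Notes on version B (the rewrite author's own statement) =====
-- stated objective: simpler
-- what changed: B filters the string into digits/letters with comprehensions and picks the section by the closed-form index (n-1)//20 into a 3-tuple instead of scanning three 20-element membership lists, and collects sector matches in one comprehension instead of growing a shared result list.
-- outside the precondition, e.g. on plane_seat(''): A raises ValueError, B raises ValueError
import Mathlib
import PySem

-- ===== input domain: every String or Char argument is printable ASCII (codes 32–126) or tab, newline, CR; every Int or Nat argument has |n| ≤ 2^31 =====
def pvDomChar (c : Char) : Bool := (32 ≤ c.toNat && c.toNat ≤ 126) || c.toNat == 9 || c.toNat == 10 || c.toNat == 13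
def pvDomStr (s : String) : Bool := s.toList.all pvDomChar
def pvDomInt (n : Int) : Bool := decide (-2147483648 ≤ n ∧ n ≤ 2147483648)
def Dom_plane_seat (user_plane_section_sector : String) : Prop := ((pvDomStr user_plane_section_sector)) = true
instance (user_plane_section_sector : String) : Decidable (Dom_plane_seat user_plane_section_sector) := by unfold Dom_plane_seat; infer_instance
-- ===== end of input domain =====

-- B replaces A's three 20-element section membership lists by the closed-form index (n-1)//20
-- and A's shared result list by a one-comprehension sector-match count (objective: simpler).

-- ===== PORT A =====
def planeSectionsA : List (String × List Int) :=
  [("Front",  [1, 2, 3, 4, 5, 6, 7, 8, 9, 10, 11, 12, 13, 14, 15, 16, 17, 18, 19, 20]),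
   ("Middle", [21, 22, 23, 24, 25, 26, 27, 28, 29, 30, 31, 32, 33, 34, 35, 36, 37, 38, 39, 40]),
   ("Back",   [41, 42, 43, 44, 45, 46, 47, 48, 49, 50, 51, 52, 53, 54, 55, 56, 57, 58, 59, 60])]

def planeSectorsA : List (String × String) := [("Left", "ABC"), ("Middle", "DEF"), ("Right", "GHK")]

def plane_seat (user_plane_section_sector : String) : String :=
  -- the per-character classification loop (iterating the characters, as the index loop does)
  let acc := user_plane_section_sector.toList.foldl
    (fun (acc : List Char × List Char) c =>
      if PySem.Chars.isdigit c then (acc.1 ++ [c], acc.2) else (acc.1, acc.2 ++ [c]))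
    ([], [])
  match PySem.Int.ofChars? acc.1 with
  | none => ""   -- int('') raises ValueError: these inputs are excluded by Pre_plane_seat
  | some n =>
    if n < 1 ∨ n > 60 then "No Seat!!"
    else
      let result := planeSectionsA.foldl
        (fun (res : List String) (p : _) => if p.2.contains n then res ++ [p.1] else res) []
      let result := planeSectorsA.foldl
        (fun (res : List String) (p : _) => if PySem.Chars.isIn acc.2 p.2.toList then res ++ [p.1] else res) result
      if result.length ≠ 2 then "No Seat!!" else PySem.Str.join "-" result

-- ===== PORT B =====
def sectorGroupsB : List (String × String) := [("Left", "ABC"), ("Middle", "DEF"), ("Right", "GHK")]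
def plane_seat_alt (user_plane_section_sector : String) : String :=
  let digits := user_plane_section_sector.toList.filter PySem.Chars.isdigit
  let letters := user_plane_section_sector.toList.filter (fun c => !PySem.Chars.isdigit c)
  match PySem.Int.ofChars? digits with
  | none => ""   -- int('') raises ValueError: these inputs are excluded by Pre_plane_seat
  | some n =>
    if ¬ (1 ≤ n ∧ n ≤ 60) then "No Seat!!"
    else
      let sec := PySem.List.pyGetD ["Front", "Middle", "Back"] (PySem.Int.floordiv (n - 1) 20) ""
      let ms := sectorGroupsB.filterMap
        (fun p => if PySem.Chars.isIn letters p.2.toList then some p.1 else none)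
      if ms.length ≠ 1 then "No Seat!!" else sec ++ "-" ++ ms.getD 0 ""

-- ===== PRECONDITION & SPEC =====
-- Pre_ excludes strings with no digit character, on which A's int('') raises ValueError (B raises too).
def Pre_plane_seat (user_plane_section_sector : String) : Prop :=
  user_plane_section_sector.toList.any PySem.Chars.isdigit = true
instance (user_plane_section_sector : String) : Decidable (Pre_plane_seat user_plane_section_sector) := by
  unfold Pre_plane_seat; infer_instance

def pvWitness_plane_seat : String := "12B"

def Spec_plane_seat (user_plane_section_sector : String) (out : String) : Prop := out = plane_seat_alt user_plane_section_sector
instance (user_plane_section_sector : String) (out : String) : Decidable (Spec_plane_seat user_plane_section_sector out) := by unfold Spec_plane_seat; infer_instance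

-- ===== CLAIM (what is proved, stated in full; the proofs are below) =====
def Claim_equal_plane_seat : Prop := ∀ (user_plane_section_sector : String), Dom_plane_seat user_plane_section_sector → Pre_plane_seat user_plane_section_sector → Spec_plane_seat user_plane_section_sector (plane_seat user_plane_section_sector)

-- ===== LEMMAS AND PROOFS =====

-- A's classification loop is B's pair of filters.
lemma split_fold_eq (cs : List Char) (a b : List Char) :
    cs.foldl (fun (acc : List Char × List Char) c =>
      if PySem.Chars.isdigit c then (acc.1 ++ [c], acc.2) else (acc.1, acc.2 ++ [c])) (a, b)
    = (a ++ cs.filter PySem.Chars.isdigit, b ++ cs.filter (fun c => !PySem.Chars.isdigit c)) := by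
  induction cs generalizing a b with
  | nil => simp
  | cons c cs ih =>
    by_cases h : PySem.Chars.isdigit c <;> simp [h, ih]

-- A's section scan finds exactly B's closed-form section label, for 1 ≤ n ≤ 60.
lemma section_scan_eq (n : Int) (h1 : 1 ≤ n) (h2 : n ≤ 60) :
    planeSectionsA.foldl (fun (res : List String) (p : _) => if p.2.contains n then res ++ [p.1] else res) []
    = [PySem.List.pyGetD ["Front", "Middle", "Back"] (PySem.Int.floordiv (n - 1) 20) ""] := by
  interval_cases n <;> decide

-- the section label is always one of the three literals.
lemma sec_mem (n : Int) (h1 : 1 ≤ n) (h2 : n ≤ 60) :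
    PySem.List.pyGetD ["Front", "Middle", "Back"] (PySem.Int.floordiv (n - 1) 20) ""
      ∈ (["Front", "Middle", "Back"] : List String) := by
  interval_cases n <;> decide

-- the common tail: one section label plus A's sector scan vs B's sector comprehension.
lemma tail_eq (sec : String) (letters : List Char)
    (hsec : sec ∈ (["Front", "Middle", "Back"] : List String)) :
    (let result := planeSectorsA.foldl
        (fun (res : List String) (p : _) => if PySem.Chars.isIn letters p.2.toList then res ++ [p.1] else res) [sec]
     if result.length ≠ 2 then "No Seat!!" else PySem.Str.join "-" result)
    = (let ms := sectorGroupsB.filterMap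
        (fun p => if PySem.Chars.isIn letters p.2.toList then some p.1 else none)
       if ms.length ≠ 1 then "No Seat!!" else sec ++ "-" ++ ms.getD 0 "") := by
  fin_cases hsec <;>
  cases h1 : PySem.Chars.isIn letters ['A', 'B', 'C'] <;>
  cases h2 : PySem.Chars.isIn letters ['D', 'E', 'F'] <;>
  cases h3 : PySem.Chars.isIn letters ['G', 'H', 'K'] <;>
    simp [planeSectorsA, sectorGroupsB, h1, h2, h3, PySem.Str.join] <;> decide

-- ===== VERDICT (by name: the statement is the Claim_ definition above) =====
theorem plane_seat_spec : Claim_equal_plane_seat := by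
  intro s _ _
  unfold Spec_plane_seat plane_seat plane_seat_alt
  simp only [split_fold_eq, List.nil_append]
  cases hp : PySem.Int.ofChars? (s.toList.filter PySem.Chars.isdigit) with
  | none => rfl
  | some n =>
    dsimp only
    by_cases h : n < 1 ∨ n > 60
    · rw [if_pos h, if_pos (by omega : ¬(1 ≤ n ∧ n ≤ 60))]
    · have h1 : 1 ≤ n := by omega
      have h2 : n ≤ 60 := by omega
      rw [if_neg h, if_neg (by omega : ¬¬(1 ≤ n ∧ n ≤ 60))]
      rw [section_scan_eq n h1 h2]
      exact tail_eq _ _ (sec_mem n h1 h2)
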